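-- pv_equiv track=rewrite | github.com/gigaquantum/rock-paper-scissors | stats_analysis.py | track_win_loss_tie
-- ===== SOURCE A (Python) =====
-- def track_win_loss_tie(data):
--     """Tracks the result of each match/throw for the player."""
--     win = 0
--     loss = 0
--     tie = 0
--     for tournament in data:
--         for match in tournament:
--             if match["winner"] == "player":
--                 win += 1
--             elif match["winner"] == "ai":
--                 loss += 1
--             elif match["winner"] == "none":
--                 tie += 1
--     return win, loss, tie
-- ===== SOURCE B (Python) =====
-- def track_win_loss_tie(data):
--     """Tracks the result of each match/throw for the player."""
--     winners = [match["winner"] for tournament in data for match in tournament]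
--     return winners.count("player"), winners.count("ai"), winners.count("none")
-- ===== Notes on version B (the rewrite author's own statement) =====
-- stated objective: simpler
-- what changed: Replaces the nested loops with an if/elif ladder updating three scalar accumulators by flattening all winner values once and taking three independent list.count passes, one per result value.
import Mathlib
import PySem

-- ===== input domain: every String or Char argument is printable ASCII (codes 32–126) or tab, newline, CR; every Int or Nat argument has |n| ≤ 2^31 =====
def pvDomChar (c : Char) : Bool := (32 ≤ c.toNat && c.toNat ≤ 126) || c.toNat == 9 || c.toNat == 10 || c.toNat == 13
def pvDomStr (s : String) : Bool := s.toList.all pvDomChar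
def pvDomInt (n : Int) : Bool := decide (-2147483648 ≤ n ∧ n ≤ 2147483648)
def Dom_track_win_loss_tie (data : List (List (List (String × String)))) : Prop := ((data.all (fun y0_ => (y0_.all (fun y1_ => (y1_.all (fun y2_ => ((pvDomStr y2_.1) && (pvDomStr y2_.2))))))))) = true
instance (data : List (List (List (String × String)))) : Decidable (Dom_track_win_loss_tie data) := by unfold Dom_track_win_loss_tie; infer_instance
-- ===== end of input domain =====

-- B flattens all winner values once and takes three independent list.count passes,
-- replacing A's single nested pass with an if/elif ladder over three scalar accumulators (simpler).

-- ===== PORT A =====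
-- match["winner"]: first-match dict lookup; Pre_ guarantees the key is present (else Python raises KeyError).
def track_win_loss_tie (data : List (List (List (String × String)))) : Int × Int × Int :=
  data.foldl (fun s tournament =>
    tournament.foldl (fun s m =>
      let w := (PySem.Dict.mk m).getD "winner" ""
      if w == "player" then (s.1 + 1, s.2.1, s.2.2)
      else if w == "ai" then (s.1, s.2.1 + 1, s.2.2)
      else if w == "none" then (s.1, s.2.1, s.2.2 + 1)
      else s) s) (0, 0, 0)

-- ===== PORT B =====
def track_win_loss_tie_alt (data : List (List (List (String × String)))) : Int × Int × Int :=
  let winners := data.flatMap (fun tournament =>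
    tournament.map (fun m => (PySem.Dict.mk m).getD "winner" ""))
  ((PySem.List.count winners "player" : Int),
   (PySem.List.count winners "ai" : Int),
   (PySem.List.count winners "none" : Int))

-- ===== PRECONDITION & SPEC =====
-- Pre_ excludes exactly the inputs where some match dict lacks the "winner" key,
-- on which the Python A (and B) raises KeyError.
def Pre_track_win_loss_tie (data : List (List (List (String × String)))) : Prop :=
  ∀ t ∈ data, ∀ m ∈ t, (PySem.Dict.mk m).contains "winner" = true
instance (data : List (List (List (String × String)))) : Decidable (Pre_track_win_loss_tie data) := by unfold Pre_track_win_loss_tie; infer_instance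
def pvWitness_track_win_loss_tie : (List (List (List (String × String)))) := [[[("winner", "player")], [("winner", "ai")]], [[("winner", "none")]]]

def Spec_track_win_loss_tie (data : List (List (List (String × String)))) (out : Int × Int × Int) : Prop := out = track_win_loss_tie_alt data
instance (data : List (List (List (String × String)))) (out : Int × Int × Int) : Decidable (Spec_track_win_loss_tie data out) := by unfold Spec_track_win_loss_tie; infer_instance

-- ===== CLAIM (what is proved, stated in full; the proofs are below) =====
def Claim_equal_track_win_loss_tie : Prop := ∀ (data : List (List (List (String × String)))), Dom_track_win_loss_tie data → Pre_track_win_loss_tie data → Spec_track_win_loss_tie data (track_win_loss_tie data)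

-- ===== LEMMAS AND PROOFS =====

-- winner of one match
def pvW (m : List (String × String)) : String := (PySem.Dict.mk m).getD "winner" ""

-- A's inner loop counts the three values into the accumulator.
theorem innerA (t : List (List (String × String))) (s : Int × Int × Int) :
    t.foldl (fun s m =>
      let w := (PySem.Dict.mk m).getD "winner" ""
      if w == "player" then (s.1 + 1, s.2.1, s.2.2)
      else if w == "ai" then (s.1, s.2.1 + 1, s.2.2)
      else if w == "none" then (s.1, s.2.1, s.2.2 + 1)
      else s) s
    = (s.1 + ((t.map pvW).count "player" : Int),
       s.2.1 + ((t.map pvW).count "ai" : Int),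
       s.2.2 + ((t.map pvW).count "none" : Int)) := by
  induction t generalizing s with
  | nil => simp
  | cons m rest ih =>
    simp only [List.foldl_cons, List.map_cons, ih, List.count_cons]
    have hw : (PySem.Dict.mk m).getD "winner" "" = pvW m := rfl
    rw [hw]
    by_cases h1 : pvW m = "player" <;> by_cases h2 : pvW m = "ai" <;>
      by_cases h3 : pvW m = "none" <;>
      simp_all <;> push_cast <;> ring

-- A's nested loops count the three values over all matches.
theorem outerA (data : List (List (List (String × String)))) (s : Int × Int × Int) :
    data.foldl (fun s tournament =>
      tournament.foldl (fun s m =>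
        let w := (PySem.Dict.mk m).getD "winner" ""
        if w == "player" then (s.1 + 1, s.2.1, s.2.2)
        else if w == "ai" then (s.1, s.2.1 + 1, s.2.2)
        else if w == "none" then (s.1, s.2.1, s.2.2 + 1)
        else s) s) s
    = (s.1 + (((data.flatMap (fun t => t.map pvW)).count "player" : Int)),
       s.2.1 + (((data.flatMap (fun t => t.map pvW)).count "ai" : Int)),
       s.2.2 + (((data.flatMap (fun t => t.map pvW)).count "none" : Int))) := by
  induction data generalizing s with
  | nil => simp
  | cons t rest ih =>
    rw [List.foldl_cons, innerA, ih]
    simp only [List.flatMap_cons, List.count_append]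
    refine Prod.ext ?_ (Prod.ext ?_ ?_) <;> simp <;> push_cast <;> ring

-- ===== VERDICT (by name: the statement is the Claim_ definition above) =====
theorem track_win_loss_tie_spec : Claim_equal_track_win_loss_tie := by
  intro data _ _
  unfold Spec_track_win_loss_tie track_win_loss_tie track_win_loss_tie_alt
  rw [outerA]
  simp only [PySem.List.count_eq]
  unfold pvW
  simp
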